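-- pv_equiv track=rewrite | github.com/hexagramg/qwlayout | port.py | convoluteZone
-- ===== SOURCE A (Python) =====
-- def convoluteZone(labels):  # returns array of str(letters) by finger zones
--     newZone = []
--     for x, row in enumerate(labels):
--         i = 0
--         for y, label in enumerate(row):
--             if y in [4,6] or y > 9:
--                 newZone[i-1] += label
--             else:
--                 if x==0:
--                     newZone.append(label)
--                 else:
--                     newZone[i] += label
--                     i += 1
--     return newZone
-- ===== SOURCE B (Python) =====
-- def convoluteZone(labels):  # returns array of str(letters) by finger zones
--     # zone-major gather: zone(y) is a pure function of the column index, so each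
--     # output string is built independently by one comprehension over the whole grid
--     if not labels:
--         return []
--
--     def zone(y):
--         return sum(1 for c in range(y + 1) if c not in (4, 6) and c <= 9) - 1
--
--     zone_count = zone(len(labels[0]) - 1) + 1 if labels[0] else 0
--     return [''.join(label for row in labels for y, label in enumerate(row) if zone(y) == k)
--             for k in range(zone_count)]
-- ===== Notes on version B (the rewrite author's own statement) =====
-- stated objective: alternative
-- what changed: B replaces A's single row-major pass that mutates a growing zone list (with an x==0 append case and a running counter i) by a zone-major gather: the zone of a column is a pure function of the column index, so B builds each output string independently with one comprehension per zone over the whole grid.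
import Mathlib
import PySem

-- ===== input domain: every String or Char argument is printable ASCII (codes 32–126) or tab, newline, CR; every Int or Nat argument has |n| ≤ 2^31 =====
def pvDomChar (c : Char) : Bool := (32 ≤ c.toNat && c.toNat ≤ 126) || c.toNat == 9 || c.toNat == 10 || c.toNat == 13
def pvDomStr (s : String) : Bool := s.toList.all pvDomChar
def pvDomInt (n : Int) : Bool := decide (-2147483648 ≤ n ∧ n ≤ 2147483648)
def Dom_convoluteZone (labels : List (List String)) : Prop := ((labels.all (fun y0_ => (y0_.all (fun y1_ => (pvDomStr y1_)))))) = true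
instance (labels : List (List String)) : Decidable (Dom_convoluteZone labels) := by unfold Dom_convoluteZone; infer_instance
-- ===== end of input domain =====

-- B replaces A's row-major mutate-in-place pass by a zone-major gather: each output
-- string is built independently from the column-zone function (alternative decomposition).

-- zs[j] += l  (Python list-element augmented assignment; out-of-range j = IndexError, excluded by Pre_)
def pvAddAt (zs : List String) (j : Int) (l : String) : List String :=
  PySem.List.pySetD zs j (PySem.List.pyGetD zs j "" ++ l)

-- ===== PORT A =====
-- inner loop of A: state is (newZone, i); y is the enumerate counter
def convZA_inner (x : Nat) : Nat → List String → List String → Int → List String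
  | _, [], newZone, _ => newZone
  | y, label :: rest, newZone, i =>
    if y = 4 ∨ y = 6 ∨ y > 9 then
      convZA_inner x (y+1) rest (pvAddAt newZone (i-1) label) i
    else if x = 0 then
      convZA_inner x (y+1) rest (newZone ++ [label]) i
    else
      convZA_inner x (y+1) rest (pvAddAt newZone i label) (i+1)

-- outer loop of A: x is the enumerate counter over rows
def convZA_outer : Nat → List (List String) → List String → List String
  | _, [], newZone => newZone
  | x, row :: rest, newZone => convZA_outer (x+1) rest (convZA_inner x 0 row newZone 0)

def convoluteZone (labels : List (List String)) : List String :=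
  convZA_outer 0 labels []

-- ===== PORT B =====
-- Source B's zone(y): number of real columns among 0..y, minus 1
def pvZone (y : Int) : Int :=
  ((List.range (y + 1).toNat).countP (fun c => !(c == 4 || c == 6) && c ≤ 9) : Int) - 1

def convoluteZone_alt (labels : List (List String)) : List String :=
  match labels with
  | [] => []
  | r0 :: rest =>
    let zc : Int := if r0.length = 0 then 0 else pvZone ((r0.length : Int) - 1) + 1
    (PySem.List.pyRange 0 zc 1).map (fun k =>
      PySem.Str.join "" ((r0 :: rest).flatMap (fun row =>
        (PySem.List.enumerate row 0).filterMap (fun p =>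
          if pvZone p.1 = k then some p.2 else none))))

-- ===== PRECONDITION & SPEC =====
-- number of real (non-merge) columns among the first n column indices
def pvRealCount (n : Nat) : Nat :=
  (List.range n).countP (fun y => !(y == 4 || y == 6) && y ≤ 9)

-- Pre_ excludes exactly the inputs on which Python A raises IndexError: a row after the first
-- with more real (non-merge) columns than row 0 has (B returns a value there, so nothing to match).
def Pre_convoluteZone (labels : List (List String)) : Prop :=
  ∀ row ∈ labels.tail, pvRealCount row.length ≤ pvRealCount ((labels.head?.getD []).length)
instance (labels : List (List String)) : Decidable (Pre_convoluteZone labels) := by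
  unfold Pre_convoluteZone; infer_instance

def pvWitness_convoluteZone : List (List String) := [["a","b","c","d","e"], ["f","g"]]

def Spec_convoluteZone (labels : List (List String)) (out : List String) : Prop := out = convoluteZone_alt labels
instance (labels : List (List String)) (out : List String) : Decidable (Spec_convoluteZone labels out) := by unfold Spec_convoluteZone; infer_instance

-- ===== CLAIM (what is proved, stated in full; the proofs are below) =====
def Claim_equal_convoluteZone : Prop := ∀ (labels : List (List String)), Dom_convoluteZone labels → Pre_convoluteZone labels → Spec_convoluteZone labels (convoluteZone labels)

-- ===== LEMMAS AND PROOFS =====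

theorem cnt_succ (y : Nat) :
    pvRealCount (y+1) = pvRealCount y + (if y = 4 ∨ y = 6 ∨ y > 9 then 0 else 1) := by
  simp only [pvRealCount, List.range_succ, List.countP_append, List.countP_cons, List.countP_nil]
  by_cases h4 : y = 4 <;> by_cases h6 : y = 6 <;> by_cases h9 : y ≤ 9 <;>
    simp [h4, h6, h9]

theorem pvZone_natCast (y : Nat) : pvZone (y : Int) = (pvRealCount (y+1) : Int) - 1 := by
  have h : ((y : Int) + 1).toNat = y + 1 := by omega
  simp [pvZone, pvRealCount, h]

theorem cnt_pos_of_merge (y : Nat) (h : y = 4 ∨ y = 6 ∨ y > 9) : 1 ≤ pvRealCount y := by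
  have h0 : (0 : Nat) ∈ List.range y := List.mem_range.mpr (by omega)
  exact List.countP_pos_iff.mpr ⟨0, h0, by decide⟩

-- number of real columns of a row starting at column index y
def pvRealsFrom : Nat → List String → Nat
  | _, [] => 0
  | y, _ :: t => (if ¬(y = 4 ∨ y = 6) ∧ y ≤ 9 then 1 else 0) + pvRealsFrom (y+1) t

theorem pvRealsFrom_eq_countP (r : List String) : ∀ y : Nat,
    pvRealsFrom y r = (List.range' y r.length).countP (fun c => !(c == 4 || c == 6) && c ≤ 9) := by
  induction r with
  | nil => intro y; rfl
  | cons a t ih =>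
    intro y
    simp only [pvRealsFrom, List.length_cons, List.range'_succ, List.countP_cons, ih (y+1)]
    by_cases h4 : y = 4 <;> by_cases h6 : y = 6 <;> by_cases h9 : y ≤ 9 <;> simp [h4, h6, h9] <;> omega

theorem pvRealsFrom_zero (r : List String) : pvRealsFrom 0 r = pvRealCount r.length := by
  rw [pvRealsFrom_eq_countP r 0, pvRealCount, List.range_eq_range']

-- zs[-1] += l on a nonempty list rewrites the last element
theorem pvAddAt_neg_one (g : List String) (a l : String) :
    pvAddAt (g ++ [a]) (-1) l = g ++ [a ++ l] := by
  rw [pvAddAt, PySem.List.pyGetD_neg_one_append_singleton g a ""]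
  simp [PySem.List.pySetD, PySem.List.pySet?, PySem.List.pyIdx?]

-- writing at index |f|-1 of f ++ padding only touches the last element of f
theorem pvAddAt_pad_last (g : List String) (a l : String) (k : Nat) :
    pvAddAt ((g ++ [a]) ++ List.replicate k "") (((g ++ [a]).length : Int) - 1) l
      = (g ++ [a ++ l]) ++ List.replicate k "" := by
  have hlen : ((g ++ [a]).length : Int) - 1 = ((g.length : Nat) : Int) := by simp
  rw [hlen]
  have h1 : PySem.List.pyGetD ((g ++ [a]) ++ List.replicate k "") ((g.length : Nat) : Int) "" = a := by
    rw [PySem.List.pyGetD_natCast]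
    rw [List.append_assoc]
    simp [List.getD]
  rw [pvAddAt, h1, PySem.List.pySetD_natCast]
  rw [List.append_assoc, List.set_append_right _ _ (by omega)]
  simp

-- writing at index |f| of f ++ ("" :: padding) fills the first free slot
theorem pvAddAt_pad_fill (f : List String) (l : String) (k : Nat) :
    pvAddAt (f ++ List.replicate (k + 1) "") ((f.length : Nat) : Int) l
      = (f ++ [l]) ++ List.replicate k "" := by
  have h1 : PySem.List.pyGetD (f ++ List.replicate (k + 1) "") ((f.length : Nat) : Int) "" = "" := by
    rw [PySem.List.pyGetD_natCast]
    simp [List.replicate_succ, List.getD]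
  rw [pvAddAt, h1, PySem.List.pySetD_natCast]
  rw [List.replicate_succ, List.set_append_right _ _ (by omega)]
  simp

-- uniform write loop: every column y of the row does zs[zone(y)] += label
def fillRow : Nat → List String → List String → List String
  | _, [], zs => zs
  | y, l :: t, zs => fillRow (y+1) t (pvAddAt zs (pvZone y) l)

-- A's inner loop on a row with x ≠ 0 is exactly the uniform fill loop
theorem inner_eq_fill (r : List String) : ∀ (x y : Nat) (zs : List String) (i : Int),
    x ≠ 0 → i = (pvRealCount y : Int) → convZA_inner x y r zs i = fillRow y r zs := by
  induction r with
  | nil => intro x y zs i hx hi; rfl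
  | cons l t ih =>
    intro x y zs i hx hi
    have hz := pvZone_natCast y
    have hc := cnt_succ y
    by_cases hm : y = 4 ∨ y = 6 ∨ y > 9
    · rw [if_pos hm] at hc
      have hidx : pvZone (y : Int) = i - 1 := by rw [hz]; omega
      simp only [convZA_inner, fillRow, if_pos hm, hidx]
      exact ih x (y+1) _ i hx (by omega)
    · rw [if_neg hm] at hc
      have hidx : pvZone (y : Int) = i := by rw [hz]; omega
      simp only [convZA_inner, fillRow, if_neg hm, if_neg hx, hidx]
      exact ih x (y+1) _ (i+1) hx (by omega)

-- A's first-row append loop is the uniform fill loop on the exact padding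
theorem row0_eq_fill (r : List String) : ∀ (y : Nat) (f : List String),
    f.length = pvRealCount y →
    convZA_inner 0 y r f 0 = fillRow y r (f ++ List.replicate (pvRealsFrom y r) "") := by
  induction r with
  | nil => intro y f hf; simp [convZA_inner, fillRow, pvRealsFrom]
  | cons l t ih =>
    intro y f hf
    have hz := pvZone_natCast y
    have hc := cnt_succ y
    by_cases hm : y = 4 ∨ y = 6 ∨ y > 9
    · rw [if_pos hm] at hc
      have hne : f ≠ [] := by
        have := cnt_pos_of_merge y hm
        intro h; rw [h] at hf; simp at hf; omega
      obtain ⟨g, a, rfl⟩ : ∃ g a, f = g ++ [a] := by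
        rcases List.eq_nil_or_concat f with h | ⟨g, a, h⟩
        · exact absurd h hne
        · exact ⟨g, a, by simpa [List.concat_eq_append] using h⟩
      have hflen : g.length + 1 = pvRealCount y := by simpa using hf
      have hk : pvRealsFrom y (l :: t) = pvRealsFrom (y+1) t := by
        simp only [pvRealsFrom]
        rw [if_neg (by omega : ¬(¬(y = 4 ∨ y = 6) ∧ y ≤ 9))]
        omega
      have hidx : pvZone (y : Int) = ((g ++ [a]).length : Int) - 1 := by
        rw [hz]; simp; omega
      simp only [convZA_inner, fillRow, if_pos hm, hk, hidx]
      have h0 : (0 : Int) - 1 = -1 := by omega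
      rw [h0, pvAddAt_neg_one, pvAddAt_pad_last]
      exact ih (y+1) (g ++ [a ++ l]) (by simp; omega)
    · rw [if_neg hm] at hc
      have hk : pvRealsFrom y (l :: t) = pvRealsFrom (y+1) t + 1 := by
        simp only [pvRealsFrom]
        rw [if_pos (by omega : ¬(y = 4 ∨ y = 6) ∧ y ≤ 9)]
        omega
      have hidx : pvZone (y : Int) = ((f.length : Nat) : Int) := by rw [hz]; omega
      simp only [convZA_inner, fillRow, if_neg hm, hk, hidx]
      rw [pvAddAt_pad_fill]
      exact ih (y+1) (f ++ [l]) (by simp; omega)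

-- A's outer loop from row 1 on is a fold of the uniform fill loop
theorem outer_eq_foldl (rest : List (List String)) : ∀ (x : Nat) (zs : List String), x ≠ 0 →
    convZA_outer x rest zs = rest.foldl (fun a r => fillRow 0 r a) zs := by
  induction rest with
  | nil => intro x zs hx; rfl
  | cons r t ih =>
    intro x zs hx
    simp only [convZA_outer, List.foldl_cons]
    rw [inner_eq_fill r x 0 zs 0 hx (by simp [pvRealCount])]
    exact ih (x+1) _ (by omega)

theorem length_pvAddAt (zs : List String) (j : Int) (l : String) :
    (pvAddAt zs j l).length = zs.length := by
  simp [pvAddAt, PySem.List.length_pySetD]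

theorem getD_pvAddAt (zs : List String) (n : Nat) (l : String) (j : Nat) (hj : j < zs.length) :
    (pvAddAt zs (n : Int) l).getD j "" =
      if j = n then zs.getD j "" ++ l else zs.getD j "" := by
  simp only [pvAddAt, PySem.List.pySetD_natCast, PySem.List.pyGetD_natCast]
  by_cases h : j = n
  · subst h
    rw [if_pos rfl, List.getD_eq_getElem _ _ (by simpa using hj), List.getElem_set_self]
  · rw [if_neg h, List.getD_eq_getElem _ _ (by simpa using hj),
        List.getElem_set_ne (by omega), List.getD_eq_getElem _ _ hj]

-- contribution of the columns of a row (from column y on) to zone k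
def rowPartFrom : Nat → List String → Int → String
  | _, [], _ => ""
  | y, l :: t, k => (if pvZone (y : Int) = k then l else "") ++ rowPartFrom (y+1) t k

theorem length_fillRow (r : List String) : ∀ (y : Nat) (zs : List String),
    (fillRow y r zs).length = zs.length := by
  induction r with
  | nil => intro y zs; rfl
  | cons l t ih => intro y zs; simp [fillRow, ih, length_pvAddAt]

theorem fill_getD (r : List String) : ∀ (y : Nat) (zs : List String),
    pvRealCount y + pvRealsFrom y r ≤ zs.length →
    ∀ j : Nat, j < zs.length →
    (fillRow y r zs).getD j "" = zs.getD j "" ++ rowPartFrom y r (j : Int) := by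
  induction r with
  | nil => intro y zs _ j _; simp [fillRow, rowPartFrom]
  | cons l t ih =>
    intro y zs hb j hj
    have hc := cnt_succ y
    have hz := pvZone_natCast y
    have hfrom : pvRealsFrom y (l :: t)
        = (if ¬(y = 4 ∨ y = 6) ∧ y ≤ 9 then 1 else 0) + pvRealsFrom (y+1) t := rfl
    by_cases hm : y = 4 ∨ y = 6 ∨ y > 9
    · -- merge column: writes at zone = pvRealCount y - 1
      have h1 : 1 ≤ pvRealCount y := cnt_pos_of_merge y hm
      have hidx : pvZone (y : Int) = ((pvRealCount y - 1 : Nat) : Int) := by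
        rw [hz, hc, if_pos hm]; omega
      have hlt : pvRealCount y - 1 < zs.length := by
        rw [hfrom] at hb; omega
      simp only [fillRow, rowPartFrom, hidx]
      rw [ih (y+1) _ (by rw [length_pvAddAt, hc, if_pos hm]; rw [hfrom] at hb; omega)
            j (by rw [length_pvAddAt]; exact hj)]
      rw [getD_pvAddAt zs _ l j hj]
      by_cases hjn : j = pvRealCount y - 1
      · rw [if_pos hjn, if_pos (by rw [hjn]), String.append_assoc]
      · rw [if_neg hjn, if_neg (by intro h; exact hjn (by omega)), String.empty_append]
    · -- real column: writes at zone = pvRealCount y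
      have hidx : pvZone (y : Int) = ((pvRealCount y : Nat) : Int) := by
        rw [hz, hc, if_neg hm]; push_cast; omega
      have hlt : pvRealCount y < zs.length := by
        rw [hfrom] at hb
        have : (if ¬(y = 4 ∨ y = 6) ∧ y ≤ 9 then 1 else 0) = 1 := by
          rw [if_pos (by omega)]
        omega
      simp only [fillRow, rowPartFrom, hidx]
      rw [ih (y+1) _ (by rw [length_pvAddAt, hc, if_neg hm]; rw [hfrom] at hb
                         rw [if_pos (by omega : ¬(y = 4 ∨ y = 6) ∧ y ≤ 9)] at hb; omega)
            j (by rw [length_pvAddAt]; exact hj)]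
      rw [getD_pvAddAt zs _ l j hj]
      by_cases hjn : j = pvRealCount y
      · rw [if_pos hjn, if_pos (by rw [hjn]), String.append_assoc]
      · rw [if_neg hjn, if_neg (by intro h; exact hjn (by omega)), String.empty_append]

-- contribution of a list of rows to zone k (rows in order)
def rowsPart : List (List String) → Int → String
  | [], _ => ""
  | r :: rs, k => rowPartFrom 0 r k ++ rowsPart rs k

theorem fold_length (rows : List (List String)) : ∀ zs : List String,
    (rows.foldl (fun a r => fillRow 0 r a) zs).length = zs.length := by
  induction rows with
  | nil => intro zs; rfl
  | cons r rs ih => intro zs; simp [List.foldl_cons, ih, length_fillRow]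

theorem fold_getD (rows : List (List String)) : ∀ zs : List String,
    (∀ row ∈ rows, pvRealCount row.length ≤ zs.length) →
    ∀ j : Nat, j < zs.length →
    (rows.foldl (fun a r => fillRow 0 r a) zs).getD j "" = zs.getD j "" ++ rowsPart rows (j : Int) := by
  induction rows with
  | nil => intro zs _ j _; simp [rowsPart]
  | cons r rs ih =>
    intro zs hb j hj
    simp only [List.foldl_cons, rowsPart]
    rw [ih (fillRow 0 r zs)
          (by intro row hrow; rw [length_fillRow]; exact hb row (List.mem_cons_of_mem _ hrow))
          j (by rw [length_fillRow]; exact hj)]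
    rw [fill_getD r 0 zs
          (by simpa [pvRealCount, pvRealsFrom_zero] using hb r List.mem_cons_self)
          j hj, String.append_assoc]

theorem str_join_empty_cons (p : String) (rest : List String) :
    PySem.Str.join "" (p :: rest) = p ++ PySem.Str.join "" rest := by
  cases rest with
  | nil => simp [PySem.Str.join, PySem.Chars.join_singleton]
  | cons q r => simp [PySem.Str.join, PySem.Chars.join_cons_cons]

theorem str_join_empty_append (a b : List String) :
    PySem.Str.join "" (a ++ b) = PySem.Str.join "" a ++ PySem.Str.join "" b := by
  induction a with
  | nil => simp [PySem.Str.join, PySem.Chars.join_nil, String.empty_append]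
  | cons p t ih => simp only [List.cons_append, str_join_empty_cons, ih, String.append_assoc]

-- B's per-row comprehension produces exactly this row's zone-k contribution
theorem rowJoin (r : List String) : ∀ (y : Nat) (k : Int),
    PySem.Str.join "" ((PySem.List.enumerate r (y : Int)).filterMap
        (fun p => if pvZone p.1 = k then some p.2 else none))
      = rowPartFrom y r k := by
  induction r with
  | nil => intro y k; simp [PySem.List.enumerate, rowPartFrom, PySem.Str.join, PySem.Chars.join_nil]
  | cons l t ih =>
    intro y k
    rw [PySem.List.enumerate_cons]
    have hy : (y : Int) + 1 = ((y + 1 : Nat) : Int) := by push_cast; ring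
    rw [hy]
    simp only [List.filterMap_cons, rowPartFrom]
    by_cases h : pvZone (y : Int) = k
    · rw [if_pos h, if_pos h, str_join_empty_cons, ih (y+1) k]
    · rw [if_neg h, if_neg h, ih (y+1) k, String.empty_append]

theorem rowsJoin (rows : List (List String)) (k : Int) :
    PySem.Str.join "" (rows.flatMap (fun row =>
        (PySem.List.enumerate row 0).filterMap (fun p => if pvZone p.1 = k then some p.2 else none)))
      = rowsPart rows k := by
  induction rows with
  | nil => simp [rowsPart, PySem.Str.join, PySem.Chars.join_nil]
  | cons r rs ih =>
    simp only [List.flatMap_cons, str_join_empty_append, ih, rowsPart]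
    congr 1
    have h0 := rowJoin r 0 k
    simpa using h0

theorem zc_eq (n : Nat) :
    (if n = 0 then 0 else pvZone ((n : Int) - 1) + 1) = (pvRealCount n : Int) := by
  cases n with
  | zero => simp [pvRealCount]
  | succ m =>
    have h : ((m + 1 : Nat) : Int) - 1 = (m : Int) := by push_cast; ring
    rw [if_neg (by omega), h, pvZone_natCast m]
    omega

-- ===== VERDICT (by name: the statement is the Claim_ definition above) =====
theorem convoluteZone_spec : Claim_equal_convoluteZone := by
  unfold Claim_equal_convoluteZone
  intro labels _ hpre
  unfold Spec_convoluteZone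
  cases labels with
  | nil => rfl
  | cons r0 rest =>
    have hzc := zc_eq r0.length
    set zcN := pvRealCount r0.length with hzcN
    -- A as a uniform fold of fillRow over all rows
    have hA : convoluteZone (r0 :: rest)
        = (r0 :: rest).foldl (fun a r => fillRow 0 r a) (List.replicate zcN "") := by
      show convZA_outer 0 (r0 :: rest) [] = _
      simp only [convZA_outer, List.foldl_cons]
      rw [outer_eq_foldl rest 1 _ (by omega)]
      have h := row0_eq_fill r0 0 [] (by simp [pvRealCount])
      rw [h, pvRealsFrom_zero, ← hzcN]
      simp
    -- bounds from Pre_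
    have hbound : ∀ row ∈ r0 :: rest, pvRealCount row.length ≤ (List.replicate zcN ("" : String)).length := by
      intro row hrow
      rw [List.length_replicate]
      rcases List.mem_cons.mp hrow with h | h
      · rw [h]
      · exact hpre row (by simpa using h)
    rw [hA]
    unfold convoluteZone_alt
    simp only []
    apply List.ext_getElem
    · rw [fold_length, List.length_replicate, List.length_map,
          PySem.List.length_pyRange_one, hzc]
      omega
    · intro j h1 h2
      have hjlt : j < zcN := by
        rw [fold_length, List.length_replicate] at h1; exact h1
      have hL : ((r0 :: rest).foldl (fun a r => fillRow 0 r a) (List.replicate zcN ""))[j]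
          = rowsPart (r0 :: rest) (j : Int) := by
        rw [← List.getD_eq_getElem _ "" h1]
        rw [fold_getD (r0 :: rest) (List.replicate zcN "") hbound j
              (by rw [List.length_replicate]; exact hjlt)]
        rw [List.getD_eq_getElem _ "" (by rw [List.length_replicate]; exact hjlt)]
        simp [String.empty_append]
      rw [hL, List.getElem_map, PySem.List.getElem_pyRange_one]
      rw [rowsJoin]
      norm_num
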